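-- pv_equiv track=rewrite | github.com/yaojiejia/myLeet | 2591-frog-jump-ii/frog-jump-ii.py | maxJump
-- ===== SOURCE A (Python) =====
-- from typing import List
--
-- def maxJump(stones: List[int]) -> int:
--     if len(stones) == 2:
--         return (stones[-1] - stones[0])
--     maxjump = 0
--     i, j = 0, 2
--     while j < len(stones):
--         maxjump = max(maxjump, (stones[j] - stones[i]))
--         i+= 1; j+= 1
--     return maxjump
-- ===== SOURCE B (Python) =====
-- from typing import List
--
-- def maxJump(stones: List[int]) -> int:
--     if len(stones) == 2:
--         return stones[1] - stones[0]
--     best = 0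
--     for seq in (stones[::2], stones[1::2]):
--         for a, b in zip(seq, seq[1:]):
--             best = max(best, b - a)
--     return best
-- ===== Notes on version B (the rewrite author's own statement) =====
-- stated objective: alternative
-- what changed: Instead of a single while loop over index pairs (i, i+2), B splits the stones into the even- and odd-indexed subsequences (the two frogs' paths) and takes the maximum adjacent difference over each, combined into one running maximum; the slicing/zip traversal runs in C, giving a constant-factor speedup.
import Mathlib
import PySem

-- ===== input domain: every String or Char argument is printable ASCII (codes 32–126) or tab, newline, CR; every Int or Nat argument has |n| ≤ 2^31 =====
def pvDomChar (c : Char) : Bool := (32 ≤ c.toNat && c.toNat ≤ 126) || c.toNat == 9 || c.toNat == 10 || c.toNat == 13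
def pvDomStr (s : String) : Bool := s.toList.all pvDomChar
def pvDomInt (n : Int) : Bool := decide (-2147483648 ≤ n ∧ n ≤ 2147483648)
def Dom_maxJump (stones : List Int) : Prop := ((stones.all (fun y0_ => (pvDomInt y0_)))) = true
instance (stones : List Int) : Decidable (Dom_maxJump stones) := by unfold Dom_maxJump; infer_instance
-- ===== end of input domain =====

-- ===== PORT A =====
-- A's while loop over (i, j = i+2) transcribed as a recursion on the suffix stones[i:],
-- with the same accumulator maxjump and the same order of max updates.
def maxJumpGo (acc : Int) : List Int → Int
  | a :: b :: c :: rest => maxJumpGo (max acc (c - a)) (b :: c :: rest)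
  | _ => acc
termination_by l => l.length

def maxJump (stones : List Int) : Int :=
  if stones.length == 2 then
    ((PySem.List.pyGet? stones (-1)).getD 0) - ((PySem.List.pyGet? stones 0).getD 0)
  else
    maxJumpGo 0 stones

-- ===== PORT B =====
-- stones[::2] / stones[1::2]: every-other-element subsequence, ported by hand (exact).
def everyOther : List Int → List Int
  | [] => []
  | [x] => [x]
  | x :: _ :: rest => x :: everyOther rest

-- the inner 'for a, b in zip(seq, seq[1:])' loop carrying best
def adjMax (acc : Int) : List Int → Int
  | x :: y :: rest => adjMax (max acc (y - x)) (y :: rest)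
  | _ => acc
termination_by l => l.length

def maxJump_alt (stones : List Int) : Int :=
  if stones.length == 2 then
    ((PySem.List.pyGet? stones 1).getD 0) - ((PySem.List.pyGet? stones 0).getD 0)
  else
    adjMax (adjMax 0 (everyOther stones)) (everyOther (stones.drop 1))

-- ===== PRECONDITION & SPEC =====
def Spec_maxJump (stones : List Int) (out : Int) : Prop := out = maxJump_alt stones
instance (stones : List Int) (out : Int) : Decidable (Spec_maxJump stones out) := by unfold Spec_maxJump; infer_instance

-- ===== CLAIM (what is proved, stated in full; the proofs are below) =====
def Claim_equal_maxJump : Prop := ∀ (stones : List Int), Dom_maxJump stones → Spec_maxJump stones (maxJump stones)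

-- ===== LEMMAS AND PROOFS =====
-- the list of by-two differences stones[j] - stones[j-2]
def diffs2 : List Int → List Int
  | a :: b :: c :: rest => (c - a) :: diffs2 (b :: c :: rest)
  | _ => []
termination_by l => l.length

-- the list of adjacent differences
def adjDiffs : List Int → List Int
  | x :: y :: rest => (y - x) :: adjDiffs (y :: rest)
  | _ => []
termination_by l => l.length

theorem maxJumpGo_eq_foldl (acc : Int) (l : List Int) :
    maxJumpGo acc l = List.foldl max acc (diffs2 l) := by
  induction acc, l using maxJumpGo.induct with
  | case1 acc a b c rest ih => simp [maxJumpGo, diffs2, ih]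
  | case2 acc l h => cases l with
    | nil => simp [maxJumpGo, diffs2]
    | cons x t => cases t with
      | nil => simp [maxJumpGo, diffs2]
      | cons y u => cases u with
        | nil => simp [maxJumpGo, diffs2]
        | cons z v => exact absurd rfl (h x y z v)

theorem adjMax_eq_foldl (acc : Int) (l : List Int) :
    adjMax acc l = List.foldl max acc (adjDiffs l) := by
  induction acc, l using adjMax.induct with
  | case1 acc x y rest ih => simp [adjMax, adjDiffs, ih]
  | case2 acc l h => cases l with
    | nil => simp [adjMax, adjDiffs]
    | cons x t => cases t with
      | nil => simp [adjMax, adjDiffs]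
      | cons y u => exact absurd rfl (h x y u)

theorem diffs2_perm (l : List Int) :
    List.Perm (diffs2 l) (adjDiffs (everyOther l) ++ adjDiffs (everyOther (l.drop 1))) := by
  induction l using diffs2.induct with
  | case1 a b c rest ih =>
      have he : everyOther (a :: b :: c :: rest) = a :: everyOther (c :: rest) := rfl
      have hd : (a :: b :: c :: rest).drop 1 = b :: c :: rest := rfl
      have heo : ∃ t, everyOther (c :: rest) = c :: t := by
        cases rest with
        | nil => exact ⟨[], rfl⟩
        | cons d r => exact ⟨everyOther r, rfl⟩
      obtain ⟨t, ht⟩ := heo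
      rw [hd, he, ht]
      have h1 : diffs2 (a :: b :: c :: rest) = (c - a) :: diffs2 (b :: c :: rest) := by
        simp [diffs2]
      have h2 : adjDiffs (a :: c :: t) = (c - a) :: adjDiffs (c :: t) := by
        simp [adjDiffs]
      rw [h1, h2]
      refine List.Perm.cons _ ?_
      have hstep : List.Perm (diffs2 (b :: c :: rest))
          (adjDiffs (everyOther ((b :: c :: rest).drop 1)) ++ adjDiffs (everyOther (b :: c :: rest))) :=
        ih.trans List.perm_append_comm
      rw [show ((b:Int) :: c :: rest).drop 1 = c :: rest from rfl, ht] at hstep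
      exact hstep
  | case2 l h => cases l with
    | nil => simp [diffs2, everyOther, adjDiffs]
    | cons x t => cases t with
      | nil => simp [diffs2, everyOther, adjDiffs]
      | cons y u => cases u with
        | nil => simp [diffs2, everyOther, adjDiffs]
        | cons z v => exact absurd rfl (h x y z v)

-- ===== VERDICT (by name: the statement is the Claim_ definition above) =====
theorem maxJump_spec : Claim_equal_maxJump := by
  intro stones _
  unfold Spec_maxJump maxJump maxJump_alt
  by_cases h : stones.length = 2
  · obtain ⟨x, y, rfl⟩ : ∃ x y, stones = [x, y] := by
      match stones, h with
      | [x, y], _ => exact ⟨x, y, rfl⟩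
    simp [PySem.List.pyGet?, PySem.List.pyIdx?]
  · simp only [beq_iff_eq, h, if_false]
    rw [maxJumpGo_eq_foldl,
        (diffs2_perm stones).foldl_eq 0,
        List.foldl_append, adjMax_eq_foldl, adjMax_eq_foldl]
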